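-- pv_equiv track=rewrite | github.com/aradchilo/django_learning | test.py | countOdds
-- ===== SOURCE A (Python) =====
-- def countOdds(low: int, high: int) -> int:
--     count_odd = 0
--
--     for number in range(low, high + 1):
--         if low < 0:
--             raise ValueError('Low number is lower then 0')
--         elif high > 10 ** 9:
--             raise ValueError('High number is higher then 10^9')
--         elif low > high:
--             raise ValueError('Low number cannot ba higher then high one')
--         else:
--             if number % 2 != 0:
--                 count_odd += 1
--             else:
--                 pass
--     return count_odd
-- ===== SOURCE B (Python) =====
-- def countOdds(low: int, high: int) -> int:
--     if low > high:
--         return 0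
--     return (high + 1) // 2 - low // 2
-- ===== Notes on version B (the rewrite author's own statement) =====
-- stated objective: faster
-- what changed: Replaces the per-element loop over range(low, high+1) with the closed-form count (high+1)//2 - low//2 (0 for an empty range).
import Mathlib
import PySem

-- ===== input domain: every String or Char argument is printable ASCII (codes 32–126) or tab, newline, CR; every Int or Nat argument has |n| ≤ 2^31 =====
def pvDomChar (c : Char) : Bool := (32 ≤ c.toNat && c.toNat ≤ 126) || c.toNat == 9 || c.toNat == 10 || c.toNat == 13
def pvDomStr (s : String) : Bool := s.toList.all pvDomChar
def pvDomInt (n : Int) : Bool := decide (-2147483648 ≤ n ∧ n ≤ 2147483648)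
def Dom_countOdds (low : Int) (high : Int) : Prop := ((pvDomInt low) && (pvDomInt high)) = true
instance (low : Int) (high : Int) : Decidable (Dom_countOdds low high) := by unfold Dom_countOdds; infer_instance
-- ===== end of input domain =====

-- B replaces A's per-element loop with the closed form (high+1)//2 - low//2 (O(1) vs O(high-low)).


-- ===== PORT A =====
-- loop body: `none` models a raised ValueError (such inputs are excluded by Pre_countOdds)
def countOddsStep (low : Int) (high : Int) (acc : Option Int) (number : Int) : Option Int :=
  match acc with
  | none => none
  | some c =>
    if low < 0 then none
    else if high > 10 ^ 9 then none
    else if low > high then none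
    else if PySem.Int.mod number 2 ≠ 0 then some (c + 1) else some c

def countOdds (low : Int) (high : Int) : Int :=
  ((PySem.List.pyRange low (high + 1) 1).foldl (countOddsStep low high) (some 0)).getD 0

-- ===== PORT B =====
def countOdds_alt (low : Int) (high : Int) : Int :=
  if low > high then 0
  else PySem.Int.floordiv (high + 1) 2 - PySem.Int.floordiv low 2

-- ===== PRECONDITION & SPEC =====
-- Pre_ excludes exactly the inputs on which A raises ValueError (nonempty range with low < 0 or high > 10^9).
def Pre_countOdds (low : Int) (high : Int) : Prop :=
  ¬ (low ≤ high ∧ (low < 0 ∨ high > 10 ^ 9))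
instance (low : Int) (high : Int) : Decidable (Pre_countOdds low high) := by
  unfold Pre_countOdds; infer_instance

def pvWitness_countOdds : Int × Int := (0, 5)

def Spec_countOdds (low : Int) (high : Int) (out : Int) : Prop := out = countOdds_alt low high
instance (low : Int) (high : Int) (out : Int) : Decidable (Spec_countOdds low high out) := by
  unfold Spec_countOdds; infer_instance

-- ===== CLAIM (what is proved, stated in full; the proofs are below) =====
def Claim_equal_countOdds : Prop := ∀ (low : Int) (high : Int), Dom_countOdds low high → Pre_countOdds low high → Spec_countOdds low high (countOdds low high)

-- ===== LEMMAS AND PROOFS =====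

-- under the preconditions the loop never raises and just counts odds
theorem countOdds_fold (low high : Int) (h0 : ¬ low < 0) (h9 : ¬ high > 10 ^ 9)
    (hle : ¬ low > high) :
    ∀ (n : Nat) (a c : Int),
      (PySem.List.pyRange a (a + (n : Int)) 1).foldl (countOddsStep low high) (some c)
        = some (c + (PySem.Int.floordiv (a + (n : Int)) 2 - PySem.Int.floordiv a 2)) := by
  intro n
  induction n with
  | zero =>
    intro a c
    rw [PySem.List.pyRange_one_eq_nil (by omega)]
    simp
  | succ n ih =>
    intro a c
    rw [PySem.List.pyRange_one_cons (by omega)]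
    simp only [List.foldl_cons]
    have hstep : countOddsStep low high (some c) a
        = some (if PySem.Int.mod a 2 ≠ 0 then c + 1 else c) := by
      simp only [countOddsStep]
      rw [if_neg h0, if_neg h9, if_neg hle]
      split_ifs <;> rfl
    rw [hstep]
    have harith : (if PySem.Int.mod a 2 ≠ 0 then c + 1 else c)
        + (PySem.Int.floordiv (a + 1 + (n : Int)) 2 - PySem.Int.floordiv (a + 1) 2)
        = c + (PySem.Int.floordiv (a + ((n : Nat) + 1 : Nat) : Int) 2 - PySem.Int.floordiv a 2) := by
      rw [PySem.Int.floordiv_eq_ediv_of_pos (a := a) (by omega),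
          PySem.Int.floordiv_eq_ediv_of_pos (a := a + 1) (by omega),
          PySem.Int.floordiv_eq_ediv_of_pos (a := a + 1 + (n : Int)) (by omega),
          PySem.Int.floordiv_eq_ediv_of_pos (a := (a + ((n : Nat) + 1 : Nat) : Int)) (by omega),
          PySem.Int.mod_eq_emod_of_pos (by omega)]
      split_ifs with h <;> push_cast <;> omega
    rw [show a + ((n : Nat) + 1 : Nat) = a + 1 + (n : Int) by push_cast; ring] at harith ⊢
    rw [ih (a + 1) _, harith]

-- ===== VERDICT (by name: the statement is the Claim_ definition above) =====
theorem countOdds_spec : Claim_equal_countOdds := by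
  intro low high _hdom hpre
  unfold Spec_countOdds countOdds countOdds_alt
  unfold Pre_countOdds at hpre
  by_cases hgt : low > high
  · rw [PySem.List.pyRange_one_eq_nil (by omega)]
    simp [hgt]
  · have h0 : ¬ low < 0 := by omega
    have h9 : ¬ high > 10 ^ 9 := by omega
    have hn : (high + 1) = low + (((high + 1 - low).toNat : Nat) : Int) := by omega
    rw [hn, countOdds_fold low high h0 h9 hgt]
    simp [hgt]
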